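-- pv_equiv track=rewrite | github.com/derekwan1/Bioinformatics-Toolbox | location_c.py | index_candidate
-- ===== SOURCE A (Python) =====
-- def index_candidate(DNA, candidate):
-- 	concatenated_DNA = ''
-- 	for line in DNA:
-- 		concatenated_DNA += line
-- 	index = 0
-- 	for nucleotide in concatenated_DNA:
-- 		if concatenated_DNA[index:index+len(candidate)] == candidate:
-- 			return index
-- 		index+=1
-- ===== SOURCE B (Python) =====
-- def index_candidate(DNA, candidate):
--     i = "".join(DNA).find(candidate)
--     return None if i < 0 else i
-- ===== Notes on version B (the rewrite author's own statement) =====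
-- stated objective: idiomatic
-- what changed: Replaces the quadratic hand loop (repeated += concatenation plus a fresh slice comparison at every index) with ''.join plus str.find, which locates the leftmost occurrence in one C-level pass.
-- intended difference: When candidate is '' and every string in DNA is empty, A falls through its empty loop and returns None, while B returns 0; Python's own find semantics say the empty string occurs at index 0 of any string, so 0 is the intended value. — e.g. on index_candidate([], ""): A returns none, B returns some 0
import Mathlib
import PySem

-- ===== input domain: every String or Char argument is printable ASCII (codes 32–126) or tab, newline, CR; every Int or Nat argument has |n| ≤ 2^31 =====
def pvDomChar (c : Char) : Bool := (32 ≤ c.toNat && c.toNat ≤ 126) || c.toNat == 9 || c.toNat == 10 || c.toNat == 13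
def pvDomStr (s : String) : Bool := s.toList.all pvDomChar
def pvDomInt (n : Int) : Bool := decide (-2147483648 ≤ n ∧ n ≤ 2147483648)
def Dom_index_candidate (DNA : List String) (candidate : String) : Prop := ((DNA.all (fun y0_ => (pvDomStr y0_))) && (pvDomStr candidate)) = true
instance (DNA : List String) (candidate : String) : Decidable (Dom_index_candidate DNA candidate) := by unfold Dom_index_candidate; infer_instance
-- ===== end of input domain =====

-- B replaces A's quadratic hand loop (+= concatenation and a fresh slice comparison at every
-- index) with ''.join + str.find; on empty candidate with all-empty DNA, B returns 0 (find
-- semantics) where A returns None — stated as the intended difference D_ below.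


-- ===== PORT A =====
-- the 'for nucleotide in concatenated_DNA' loop with its running index
def pvLoopA (s : List Char) (cand : List Char) : Nat → List Char → Option Int
  | _index, [] => none
  | index, _nucleotide :: rest =>
    if PySem.List.slice s (some (index : Int)) (some ((index : Int) + (cand.length : Int))) = cand
    then some (index : Int)
    else pvLoopA s cand (index + 1) rest

def index_candidate (DNA : List String) (candidate : String) : Option Int :=
  let concatenated_DNA : List Char := DNA.foldl (fun acc line => acc ++ line.toList) []
  pvLoopA concatenated_DNA candidate.toList 0 concatenated_DNA

-- ===== PORT B =====
def index_candidate_alt (DNA : List String) (candidate : String) : Option Int :=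
  let i := PySem.Chars.find (PySem.Chars.join [] (DNA.map String.toList)) candidate.toList
  if i < 0 then none else some i

-- ===== PRECONDITION & SPEC =====
-- When candidate is '' and every string in DNA is empty, A falls through its empty loop and
-- returns None while B returns 0; Python's find says '' occurs at index 0, so 0 is intended.
def D_index_candidate (DNA : List String) (candidate : String) : Prop :=
  candidate = "" ∧ ∀ s ∈ DNA, s = ""
instance (DNA : List String) (candidate : String) : Decidable (D_index_candidate DNA candidate) := by unfold D_index_candidate; infer_instance

def Spec_index_candidate (DNA : List String) (candidate : String) (out : Option Int) : Prop := ¬ D_index_candidate DNA candidate → out = index_candidate_alt DNA candidate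
instance (DNA : List String) (candidate : String) (out : Option Int) : Decidable (Spec_index_candidate DNA candidate out) := by unfold Spec_index_candidate; infer_instance

def pvDiffWitness_index_candidate : List String × String := ([], "")
def pvDiffWitnessOut_index_candidate : (Option Int) × (Option Int) := (none, some 0)

-- ===== CLAIM (what is proved, stated in full; the proofs are below) =====
def Claim_unchanged_index_candidate : Prop := ∀ (DNA : List String) (candidate : String), Dom_index_candidate DNA candidate → Spec_index_candidate DNA candidate (index_candidate DNA candidate)
def Claim_changed_index_candidate : Prop := Dom_index_candidate (pvDiffWitness_index_candidate.1) (pvDiffWitness_index_candidate.2) ∧ D_index_candidate (pvDiffWitness_index_candidate.1) (pvDiffWitness_index_candidate.2) ∧ index_candidate (pvDiffWitness_index_candidate.1) (pvDiffWitness_index_candidate.2) = pvDiffWitnessOut_index_candidate.1 ∧ index_candidate_alt (pvDiffWitness_index_candidate.1) (pvDiffWitness_index_candidate.2) = pvDiffWitnessOut_index_candidate.2 ∧ pvDiffWitnessOut_index_candidate.1 ≠ pvDiffWitnessOut_index_candidate.2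
def Claim_exact_index_candidate : Prop := ∀ (DNA : List String) (candidate : String), Dom_index_candidate DNA candidate → D_index_candidate DNA candidate → index_candidate DNA candidate ≠ index_candidate_alt DNA candidate

-- ===== LEMMAS AND PROOFS =====

-- A's slice test at index j succeeds iff cand is a prefix of s.drop j
lemma pvSliceCheck (s cand : List Char) (j : Nat) :
    (PySem.List.slice s (some (j : Int)) (some ((j : Int) + (cand.length : Int))) = cand) ↔
      cand <+: s.drop j := by
  rw [PySem.List.slice_natCast_add]
  constructor
  · intro h
    rw [← h]
    exact List.take_prefix _ _
  · intro h
    obtain ⟨t, ht⟩ := h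
    rw [← ht]
    simp

-- if no position from i on matches, the loop returns none
lemma pvLoopA_none (s cand : List Char) :
    ∀ (rest : List Char) (i : Nat), rest = s.drop i →
      (∀ j, i ≤ j → ¬ cand <+: s.drop j) →
      pvLoopA s cand i rest = none := by
  intro rest
  induction rest with
  | nil => intro i _ _; simp [pvLoopA]
  | cons c cs ih =>
    intro i hrest hno
    rw [pvLoopA]
    rw [if_neg]
    · exact ih (i + 1) (by rw [← List.drop_drop, ← hrest]; rfl)
        (fun j hj => hno j (by omega))
    · rw [pvSliceCheck]; exact hno i le_rfl
-- if k is the first matching position ≥ i and k < s.length, the loop returns some k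
lemma pvLoopA_some (s cand : List Char) :
    ∀ (rest : List Char) (i k : Nat), rest = s.drop i → i ≤ k → k < s.length →
      cand <+: s.drop k → (∀ j, i ≤ j → j < k → ¬ cand <+: s.drop j) →
      pvLoopA s cand i rest = some (k : Int) := by
  intro rest
  induction rest with
  | nil =>
    intro i k hrest hik hk _ _
    exfalso
    have : s.length ≤ i := by
      have := congrArg List.length hrest
      simp at this
      omega
    omega
  | cons c cs ih =>
    intro i k hrest hik hk hpre hmin
    rw [pvLoopA]
    by_cases hi : i = k
    · subst hi
      rw [if_pos]
      rw [pvSliceCheck]; exact hpre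
    · rw [if_neg]
      · exact ih (i + 1) k (by rw [← List.drop_drop, ← hrest]; rfl)
          (by omega) hk hpre (fun j hj hjk => hmin j (by omega) hjk)
      · rw [pvSliceCheck]; exact hmin i le_rfl (by omega)

-- ''.join over a list with empty separator is flatten
lemma pvJoin_nil_eq_flatten (ls : List (List Char)) :
    PySem.Chars.join [] ls = ls.flatten := by
  induction ls with
  | nil => simp [PySem.Chars.join_nil]
  | cons a ls ih =>
    cases ls with
    | nil => simp [PySem.Chars.join_singleton]
    | cons b rest =>
      rw [PySem.Chars.join_cons_cons]
      simp at ih ⊢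
      exact ih

-- A's += concatenation loop is flatten too
lemma pvFoldl_append_eq_flatten (ls : List String) :
    ∀ acc : List Char, ls.foldl (fun acc line => acc ++ line.toList) acc
      = acc ++ (ls.map String.toList).flatten := by
  induction ls with
  | nil => intro acc; simp
  | cons a ls ih => intro acc; simp [List.foldl_cons, ih]

-- core: on one text, A's scan equals find-based lookup unless both text and cand are empty
lemma pvCore (s cand : List Char) (h : ¬ (cand = [] ∧ s = [])) :
    pvLoopA s cand 0 s =
      (if PySem.Chars.find s cand < 0 then none else some (PySem.Chars.find s cand)) := by
  rcases lt_or_ge (PySem.Chars.find s cand) 0 with hneg | hpos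
  · -- find = -1 : no occurrence anywhere
    have hne : PySem.Chars.find s cand = -1 := by
      have := PySem.Chars.neg_one_le_find s cand
      omega
    have hnotin : ¬ cand <:+: s := (PySem.Chars.find_eq_neg_one_iff s cand).mp hne
    rw [if_pos hneg]
    apply pvLoopA_none s cand s 0 (by simp)
    intro j _ hpre
    exact hnotin (List.infix_iff_prefix_suffix.mpr
      ⟨_, hpre, (List.drop_suffix j s)⟩)
  · -- find ≥ 0 : first occurrence at k
    rw [if_neg (by omega)]
    obtain ⟨hpre, hmin⟩ := PySem.Chars.find_spec hpos
    set k := (PySem.Chars.find s cand).toNat with hkdef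
    have hkval : (k : Int) = PySem.Chars.find s cand := Int.toNat_of_nonneg hpos
    have hklen : (k : Int) ≤ s.length := by rw [hkval]; exact PySem.Chars.find_le_length s cand
    have hklt : k < s.length := by
      rcases eq_or_ne cand [] with hc | hc
      · -- empty candidate: find = 0, s must be nonempty
        have hs : s ≠ [] := fun hs0 => h ⟨hc, hs0⟩
        have : PySem.Chars.find s cand = 0 := by rw [hc]; exact PySem.Chars.find_nil s
        have hk0 : k = 0 := by omega
        rw [hk0]
        exact List.length_pos_of_ne_nil hs
      · have h1 : 1 ≤ cand.length := List.length_pos_of_ne_nil hc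
        have h2 : cand.length ≤ (s.drop k).length := hpre.length_le
        simp at h2
        omega
    rw [← hkval]
    exact pvLoopA_some s cand s 0 k (by simp) (Nat.zero_le _) hklt hpre
      (fun j _ hjk => hmin j hjk)

-- ===== VERDICT (by name: the statement is the Claim_ definition above) =====
theorem index_candidate_spec : Claim_unchanged_index_candidate := by
  intro DNA candidate _ hnd
  unfold index_candidate index_candidate_alt
  simp only
  rw [pvFoldl_append_eq_flatten DNA [], List.nil_append, pvJoin_nil_eq_flatten]
  apply pvCore
  rintro ⟨hc, hs⟩
  apply hnd
  constructor
  · have : candidate.toList = ("" : String).toList := by simpa using hc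
    exact String.toList_inj.mp this
  · intro s hs'
    have : s.toList = [] := by
      have := List.flatten_eq_nil_iff.mp hs
      exact this _ (List.mem_map_of_mem hs')
    have h2 : s.toList = ("" : String).toList := by simpa using this
    exact String.toList_inj.mp h2

theorem index_candidate_changed : Claim_changed_index_candidate := by
  unfold Claim_changed_index_candidate; decide

theorem index_candidate_tight : Claim_exact_index_candidate := by
  intro DNA candidate _ hd
  obtain ⟨hc, hs⟩ := hd
  have hflat : (DNA.map String.toList).flatten = [] := by
    apply List.flatten_eq_nil_iff.mpr
    intro l hl
    obtain ⟨s, hs', rfl⟩ := List.mem_map.mp hl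
    rw [hs s hs']; rfl
  have hA : index_candidate DNA candidate = none := by
    unfold index_candidate
    simp only
    rw [pvFoldl_append_eq_flatten DNA [], List.nil_append, hflat]
    rfl
  have hB : index_candidate_alt DNA candidate = some 0 := by
    unfold index_candidate_alt
    simp only
    rw [pvJoin_nil_eq_flatten, hflat, hc]
    simp [PySem.Chars.find_nil]
  rw [hA, hB]
  simp
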